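-- pv_equiv track=rewrite | github.com/IES-Rafael-Alberti/dam1-2425-ejercicios-u2-dcsibon | PiramideSumas/piramideSumas2a.py | piramide
-- ===== SOURCE A (Python) =====
-- def piramide(num: int):
--     res = ""
--     while num >= 0:
--         cont = 1
--         total = 0
--         res += str(num) + " => 0 "
--         while cont <= num:
--             res += f"+ {cont} "
--             total += cont
--             cont += 1
--         if num != 0:
--             res += f"= {total}"
--         res += "\n"
--         num -= 1
--     return res
-- ===== SOURCE B (Python) =====
-- def piramide(num: int):
--     rows = []
--     terms = ""
--     total = 0
--     for v in range(0, num + 1):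
--         if v >= 1:
--             terms += f"+ {v} "
--             total += v
--         rows.append(f"{v} => 0 " + terms + (f"= {total}" if v != 0 else "") + "\n")
--     return "".join(reversed(rows))
-- ===== Notes on version B (the rewrite author's own statement) =====
-- stated objective: faster
-- what changed: Replaced A's nested loops (each row recomputes its '+ k' terms and running total from scratch with an inner counter loop, appending piecewise to one growing result string top-down) by a single forward pass v=0..num that carries a cumulative terms string and running total, collects each row once in a list, and joins the rows in reverse order.
import Mathlib
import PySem

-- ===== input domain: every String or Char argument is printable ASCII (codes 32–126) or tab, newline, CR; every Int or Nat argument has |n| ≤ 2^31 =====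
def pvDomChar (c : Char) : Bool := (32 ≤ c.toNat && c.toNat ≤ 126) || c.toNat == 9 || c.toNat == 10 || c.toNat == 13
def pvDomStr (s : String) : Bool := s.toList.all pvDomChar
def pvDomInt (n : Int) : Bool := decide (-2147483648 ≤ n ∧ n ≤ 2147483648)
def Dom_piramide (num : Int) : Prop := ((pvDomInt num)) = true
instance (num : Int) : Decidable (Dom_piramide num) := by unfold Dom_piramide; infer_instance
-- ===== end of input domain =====

-- B replaces A's per-row inner loop (recomputing each row's terms and total from scratch)
-- by one forward pass carrying cumulative `terms`/`total`, collecting rows and joining them reversed (objective: alternative).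

-- ===== PORT A =====
-- outer 'while num >= 0' loop; the inner 'while cont <= num' counter loop is the fold over range(1, num+1)
def piramideGo (num : Int) (res : String) : String :=
  if _h : 0 ≤ num then
    let res1 := res ++ PySem.Int.toStr num ++ " => 0 "
    let st := (PySem.List.pyRange 1 (num + 1) 1).foldl
      (fun (p : String × Int) cont => (p.1 ++ "+ " ++ PySem.Int.toStr cont ++ " ", p.2 + cont)) (res1, 0)
    let res2 := if num ≠ 0 then st.1 ++ "= " ++ PySem.Int.toStr st.2 else st.1
    piramideGo (num - 1) (res2 ++ "\n")
  else res
termination_by (num + 1).toNat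
decreasing_by omega

def piramide (num : Int) : String := piramideGo num ""

-- ===== PORT B =====
def piramideAltStep (s : List String × String × Int) (v : Int) : List String × String × Int :=
  let rows := s.1
  let tt := if 1 ≤ v then (s.2.1 ++ "+ " ++ PySem.Int.toStr v ++ " ", s.2.2 + v) else s.2
  let row := PySem.Int.toStr v ++ " => 0 " ++ tt.1 ++ (if v ≠ 0 then "= " ++ PySem.Int.toStr tt.2 else "") ++ "\n"
  (rows ++ [row], tt)

def piramide_alt (num : Int) : String :=
  let st := (PySem.List.pyRange 0 (num + 1) 1).foldl piramideAltStep ([], "", 0)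
  String.join st.1.reverse

-- ===== PRECONDITION & SPEC =====
def Spec_piramide (num : Int) (out : String) : Prop := out = piramide_alt num
instance (num : Int) (out : String) : Decidable (Spec_piramide num out) := by unfold Spec_piramide; infer_instance

-- ===== CLAIM (what is proved, stated in full; the proofs are below) =====
def Claim_equal_piramide : Prop := ∀ (num : Int), Dom_piramide num → Spec_piramide num (piramide num)

-- ===== LEMMAS AND PROOFS =====

def pvTerm (c : Int) : String := "+ " ++ PySem.Int.toStr c ++ " "

def pvTerms (v : Int) : String := String.join ((PySem.List.pyRange 1 (v + 1) 1).map pvTerm)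

def pvSum (v : Int) : Int := (PySem.List.pyRange 1 (v + 1) 1).sum

def pvRow (v : Int) : String :=
  PySem.Int.toStr v ++ " => 0 " ++ pvTerms v ++ (if v ≠ 0 then "= " ++ PySem.Int.toStr (pvSum v) else "") ++ "\n"

theorem pv_join_cons (a : String) (L : List String) : String.join (a :: L) = a ++ String.join L := by
  induction L generalizing a with
  | nil => simp [String.join]
  | cons b L ih =>
    simp only [String.join, List.foldl_cons] at *
    rw [show "" ++ a ++ b = "" ++ (a ++ b) by simp]
    rw [ih (a ++ b), ih b, ← String.append_assoc]

theorem pv_pair_fold (l : List Int) (s : String) (t : Int) :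
    l.foldl (fun (p : String × Int) cont => (p.1 ++ "+ " ++ PySem.Int.toStr cont ++ " ", p.2 + cont)) (s, t)
      = (s ++ String.join (l.map pvTerm), t + l.sum) := by
  induction l generalizing s t with
  | nil => simp [String.join]
  | cons c l ih =>
    simp only [List.foldl_cons, List.map_cons, List.sum_cons, ih, pv_join_cons, Prod.mk.injEq]
    refine ⟨by simp [pvTerm, String.append_assoc], by ring⟩

theorem pv_go_neg (num : Int) (res : String) (h : num < 0) : piramideGo num res = res := by
  rw [piramideGo]; simp [not_le.mpr h]

theorem pv_go_step (num : Int) (res : String) (h : 0 ≤ num) :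
    piramideGo num res = piramideGo (num - 1) (res ++ pvRow num) := by
  rw [piramideGo]
  simp only [h, dif_pos]
  rw [pv_pair_fold]
  congr 1
  simp only [pvRow, pvTerms, pvSum]
  split_ifs with hnz <;> simp [String.append_assoc]

theorem pv_go_nat (n : Nat) (res : String) :
    piramideGo (n : Int) res
      = res ++ String.join (((List.range (n + 1)).reverse).map (fun (k : Nat) => pvRow (k : Int))) := by
  induction n generalizing res with
  | zero =>
    rw [show ((0 : Nat) : Int) = 0 by norm_num]
    rw [pv_go_step 0 res (by norm_num)]
    rw [pv_go_neg (0 - 1) _ (by norm_num)]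
    simp [String.join]
  | succ n ih =>
    rw [show ((n + 1 : Nat) : Int) = (n : Int) + 1 by push_cast; ring]
    rw [pv_go_step ((n : Int) + 1) res (by omega)]
    rw [show ((n : Int) + 1 - 1) = (n : Int) by ring]
    rw [ih]
    rw [List.range_succ (n := n + 1)]
    simp [pv_join_cons, String.append_assoc]

theorem pv_alt_fold (n : Nat) :
    (PySem.List.pyRange 0 ((n : Int) + 1) 1).foldl piramideAltStep ([], "", 0)
      = ((List.range (n + 1)).map (fun (k : Nat) => pvRow (k : Int)), pvTerms (n : Int), pvSum (n : Int)) := by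
  induction n with
  | zero =>
    rw [show ((0 : Nat) : Int) + 1 = 0 + 1 by norm_num, PySem.List.pyRange_one_singleton]
    simp only [List.foldl_cons, List.foldl_nil, piramideAltStep]
    norm_num
    refine ⟨?_, ?_, ?_⟩
    · simp [pvRow, pvTerms, PySem.List.pyRange_one_eq_nil, String.join]
    · simp [pvTerms, PySem.List.pyRange_one_eq_nil, String.join]
    · simp [pvSum, PySem.List.pyRange_one_eq_nil]
  | succ n ih =>
    rw [show ((n + 1 : Nat) : Int) + 1 = ((n : Int) + 1) + 1 by push_cast; ring]
    rw [PySem.List.pyRange_one_succ_right (by omega)]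
    rw [List.foldl_append, ih]
    simp only [List.foldl_cons, List.foldl_nil, piramideAltStep]
    have h1 : (1 : Int) ≤ (n : Int) + 1 := by omega
    have hterms : pvTerms ((n : Int) + 1) = pvTerms (n : Int) ++ ("+ " ++ PySem.Int.toStr ((n : Int) + 1) ++ " ") := by
      simp only [pvTerms]
      rw [PySem.List.pyRange_one_succ_right (by omega : (1 : Int) ≤ (n : Int) + 1)]
      simp [pvTerm, String.join, String.append_assoc]
    have hsum : pvSum ((n : Int) + 1) = pvSum (n : Int) + ((n : Int) + 1) := by
      simp only [pvSum]
      rw [PySem.List.pyRange_one_succ_right (by omega : (1 : Int) ≤ (n : Int) + 1)]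
      simp
    simp only [h1, if_pos, List.range_succ (n := n + 1), List.map_append, List.map_cons,
      List.map_nil, Prod.mk.injEq]
    have hne : ((n : Int) + 1) ≠ 0 := by omega
    push_cast
    refine ⟨?_, ?_, ?_⟩
    · congr 1
      simp only [pvRow]
      rw [hterms, hsum]
      simp [hne, String.append_assoc]
    · rw [hterms]; simp [String.append_assoc]
    · rw [hsum]

theorem pv_main (num : Int) : piramide num = piramide_alt num := by
  by_cases h : 0 ≤ num
  · obtain ⟨n, rfl⟩ : ∃ n : Nat, num = (n : Int) := ⟨num.toNat, (Int.toNat_of_nonneg h).symm⟩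
    unfold piramide piramide_alt
    rw [pv_go_nat, pv_alt_fold]
    simp [List.map_reverse]
  · unfold piramide piramide_alt
    rw [pv_go_neg num "" (by omega)]
    rw [PySem.List.pyRange_one_eq_nil (by omega : num + 1 ≤ 0)]
    simp [String.join]

-- ===== VERDICT (by name: the statement is the Claim_ definition above) =====
theorem piramide_spec : Claim_equal_piramide := by
  intro num _
  unfold Spec_piramide
  exact pv_main num
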